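-- pv_equiv track=rewrite | github.com/streanger/for-fun | peano_curve_code/peano_curve.py | peano_curve
-- ===== SOURCE A (Python) =====
-- def peano_curve(start, iterations, step):
--     '''
--     parameters:
--         -start          -frist item: P, Q, R, S
--         -iterations     -number of iterations
--         -step           -step value
--
--     info:
--         PQRS
--
--         P - down, down, right, up, up, right, down, down
--         Q - down, down, left, up, up, left, down, down
--         R - up, up, right, down, down, right, up, up
--         S - up, up, left, down, down, left, up, up
--
--         P is reverse with S
--         Q is reverse with R
--
--         P => P, Q, P, R, S, R, P, Q, P
--         Q => Q, P, Q, S, R, S, Q, P, Q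
--         R => R, S, R, P, Q, P, R, S, R
--         S => S, R, S, Q, P, Q, S, R, S
--
--     directions:
--         P
--         | +-+
--         | | |
--         +-+ v
--
--
--         S
--         ^ +-+
--         | | |
--         +-+ |
--
--
--         Q
--         +-+ |
--         | | |
--         v +-+
--
--         R
--         +-+ ^
--         | | |
--         | +-+
--
--     '''
--
--     if iterations <= 0:
--         # translate to matrix values of positions
--         values_dictio = {
--             'up': (0, -1*step),
--             'down': (0, +1*step),
--             'left': (-1*step, 0),
--             'right': (+1*step, 0),
--             }
--
--         directions_dictio = {
--             'P': ['down', 'down', 'right', 'up', 'up', 'right', 'down', 'down'],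
--             'Q': ['down', 'down', 'left', 'up', 'up', 'left', 'down', 'down'],
--             'R': ['up', 'up', 'right', 'down', 'down', 'right', 'up', 'up'],
--             'S': ['up', 'up', 'left', 'down', 'down', 'left', 'up', 'up'],
--             }
--
--         transition_dictio = {
--             'PQ': 'down',
--             'QP': 'down',
--             'PR': 'right',
--             'RP': 'right',
--             'RS': 'up',
--             'SR': 'up',
--             'QS': 'left',
--             'SQ': 'left',
--             }
--
--         out = []
--         for key, item in enumerate(start):
--             if key:
--                 # add transition between items
--                 before = start[key-1]
--                 transition = values_dictio[transition_dictio[before+item]]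
--                 out.append(transition)
--
--             dot_values = [values_dictio[direction] for direction in directions_dictio[item]]
--             out.extend(dot_values)
--         return out
--
--     recursion_dictio = {
--         'P': 'PQPRSRPQP',
--         'Q': 'QPQSRSQPQ',
--         'R': 'RSRPQPRSR',
--         'S': 'SRSQPQSRS',
--         }
--
--     data = list(start)
--     start = ''.join([recursion_dictio[item] for item in data])
--
--     return peano_curve(start, iterations-1, step)
-- ===== SOURCE B (Python) =====
-- def peano_curve(start, iterations, step):
--     """Iterative L-system expansion (loop instead of recursion) and a
--     pairwise zip over the expanded string instead of enumerate+indexing."""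
--     up, down = (0, -step), (0, step)
--     left, right = (-step, 0), (step, 0)
--     vectors = {
--         'P': [down, down, right, up, up, right, down, down],
--         'Q': [down, down, left, up, up, left, down, down],
--         'R': [up, up, right, down, down, right, up, up],
--         'S': [up, up, left, down, down, left, up, up],
--     }
--     transitions = {
--         ('P', 'Q'): down, ('Q', 'P'): down,
--         ('P', 'R'): right, ('R', 'P'): right,
--         ('R', 'S'): up, ('S', 'R'): up,
--         ('Q', 'S'): left, ('S', 'Q'): left,
--     }
--     rules = {'P': 'PQPRSRPQP', 'Q': 'QPQSRSQPQ', 'R': 'RSRPQPRSR', 'S': 'SRSQPQSRS'}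
--     s = start
--     for _ in range(max(iterations, 0)):
--         s = ''.join(rules[c] for c in s)
--     if not s:
--         return []
--     out = list(vectors[s[0]])
--     for a, b in zip(s, s[1:]):
--         out.append(transitions[(a, b)])
--         out.extend(vectors[b])
--     return out
-- ===== Notes on version B (the rewrite author's own statement) =====
-- stated objective: alternative
-- what changed: B replaces A's tail recursion on the iteration counter with an explicit expansion loop over the current string, and builds the direction list from pairwise zip(s, s[1:]) with precomputed vectors instead of A's enumerate loop that re-indexes start[key-1] and maps direction-name strings through a values dict.
import Mathlib
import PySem

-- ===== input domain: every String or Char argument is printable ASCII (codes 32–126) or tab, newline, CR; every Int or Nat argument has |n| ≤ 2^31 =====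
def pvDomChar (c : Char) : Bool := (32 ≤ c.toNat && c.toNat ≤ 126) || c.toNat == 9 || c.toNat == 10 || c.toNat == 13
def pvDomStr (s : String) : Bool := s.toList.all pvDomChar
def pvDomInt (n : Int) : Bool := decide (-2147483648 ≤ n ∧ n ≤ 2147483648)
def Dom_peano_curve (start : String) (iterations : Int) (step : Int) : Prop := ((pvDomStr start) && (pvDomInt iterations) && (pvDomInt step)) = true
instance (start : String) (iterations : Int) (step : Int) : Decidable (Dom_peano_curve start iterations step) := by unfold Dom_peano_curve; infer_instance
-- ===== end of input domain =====

-- B replaces A's recursion on the iteration counter with an explicit expansion loop and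
-- builds the output from a pairwise zip over the expanded string (alternative decomposition, same cost).


-- ===== PORT A =====
-- A's dict lookups as Option-returning functions: none = Python KeyError (excluded by Pre_).
def pvValsA (step : Int) (d : String) : Option (Int × Int) :=
  if d = "up" then some (0, -1 * step)
  else if d = "down" then some (0, 1 * step)
  else if d = "left" then some (-1 * step, 0)
  else if d = "right" then some (1 * step, 0)
  else none

def pvDirsA (c : Char) : Option (List String) :=
  if c = 'P' then some ["down", "down", "right", "up", "up", "right", "down", "down"]
  else if c = 'Q' then some ["down", "down", "left", "up", "up", "left", "down", "down"]
  else if c = 'R' then some ["up", "up", "right", "down", "down", "right", "up", "up"]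
  else if c = 'S' then some ["up", "up", "left", "down", "down", "left", "up", "up"]
  else none

-- transition_dictio[before+item]: the pair of chars selects the direction name
def pvTransA (before item : Char) : Option String :=
  if before = 'P' ∧ item = 'Q' then some "down"
  else if before = 'Q' ∧ item = 'P' then some "down"
  else if before = 'P' ∧ item = 'R' then some "right"
  else if before = 'R' ∧ item = 'P' then some "right"
  else if before = 'R' ∧ item = 'S' then some "up"
  else if before = 'S' ∧ item = 'R' then some "up"
  else if before = 'Q' ∧ item = 'S' then some "left"
  else if before = 'S' ∧ item = 'Q' then some "left"
  else none

def pvRecA (c : Char) : Option (List Char) :=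
  if c = 'P' then some ['P','Q','P','R','S','R','P','Q','P']
  else if c = 'Q' then some ['Q','P','Q','S','R','S','Q','P','Q']
  else if c = 'R' then some ['R','S','R','P','Q','P','R','S','R']
  else if c = 'S' then some ['S','R','S','Q','P','Q','S','R','S']
  else none

-- the base-case 'for key, item in enumerate(start)' loop; Option state = raised-or-not
def pvBaseA (step : Int) (s : List Char) : Option (List (Int × Int)) :=
  (PySem.List.enumerate s).foldl
    (fun acc ki =>
      acc.bind (fun out =>
        (if ki.1 ≠ 0 then
            (PySem.List.pyGet? s (ki.1 - 1)).bind (fun before =>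
              (pvTransA before ki.2).bind (fun t =>
                (pvValsA step t).map (fun tv => out ++ [tv])))
          else some out).bind (fun out2 =>
          ((pvDirsA ki.2).bind (fun dirs => dirs.mapM (pvValsA step))).map
            (fun dv => out2 ++ dv))))
    (some [])

def peano_curve (start : String) (iterations : Int) (step : Int) : List (Int × Int) :=
  if iterations ≤ 0 then
    (pvBaseA step start.toList).getD []      -- getD only reached on KeyError inputs, outside Pre_
  else
    match start.toList.mapM pvRecA with
    | none => []                             -- KeyError in recursion_dictio, outside Pre_
    | some parts => peano_curve (String.ofList parts.flatten) (iterations - 1) step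
termination_by iterations.toNat
decreasing_by omega

-- ===== PORT B =====
def pvVecsB (step : Int) (c : Char) : Option (List (Int × Int)) :=
  if c = 'P' then some [(0, step), (0, step), (step, 0), (0, -step), (0, -step), (step, 0), (0, step), (0, step)]
  else if c = 'Q' then some [(0, step), (0, step), (-step, 0), (0, -step), (0, -step), (-step, 0), (0, step), (0, step)]
  else if c = 'R' then some [(0, -step), (0, -step), (step, 0), (0, step), (0, step), (step, 0), (0, -step), (0, -step)]
  else if c = 'S' then some [(0, -step), (0, -step), (-step, 0), (0, step), (0, step), (-step, 0), (0, -step), (0, -step)]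
  else none

def pvTransB (step : Int) (a b : Char) : Option (Int × Int) :=
  if a = 'P' ∧ b = 'Q' then some (0, step)
  else if a = 'Q' ∧ b = 'P' then some (0, step)
  else if a = 'P' ∧ b = 'R' then some (step, 0)
  else if a = 'R' ∧ b = 'P' then some (step, 0)
  else if a = 'R' ∧ b = 'S' then some (0, -step)
  else if a = 'S' ∧ b = 'R' then some (0, -step)
  else if a = 'Q' ∧ b = 'S' then some (-step, 0)
  else if a = 'S' ∧ b = 'Q' then some (-step, 0)
  else none

def pvRulesB (c : Char) : Option (List Char) :=
  if c = 'P' then some ['P','Q','P','R','S','R','P','Q','P']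
  else if c = 'Q' then some ['Q','P','Q','S','R','S','Q','P','Q']
  else if c = 'R' then some ['R','S','R','P','Q','P','R','S','R']
  else if c = 'S' then some ['S','R','S','Q','P','Q','S','R','S']
  else none

-- out = list(vectors[s[0]]); for a, b in zip(s, s[1:]): out.append(trans); out.extend(vectors[b])
def pvBaseB (step : Int) (cs : List Char) : Option (List (Int × Int)) :=
  match cs with
  | [] => some []
  | c :: rest =>
    (pvVecsB step c).bind (fun out0 =>
      ((c :: rest).zip rest).foldl
        (fun acc ab =>
          acc.bind (fun out =>
            (pvTransB step ab.1 ab.2).bind (fun t =>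
              (pvVecsB step ab.2).map (fun vb => out ++ t :: vb))))
        (some out0))

def peano_curve_alt (start : String) (iterations : Int) (step : Int) : List (Int × Int) :=
  -- for _ in range(max(iterations, 0)): s = ''.join(rules[c] for c in s)
  match (List.range (max iterations 0).toNat).foldl
      (fun (acc : Option (List Char)) _ =>
        acc.bind (fun cs => (cs.mapM pvRulesB).map List.flatten))
      (some start.toList) with
  | none => []                               -- KeyError, outside Pre_
  | some cs => (pvBaseB step cs).getD []     -- getD only reached on KeyError inputs, outside Pre_

-- ===== PRECONDITION & SPEC =====
def pvOkC (c : Char) : Bool := c = 'P' || c = 'Q' || c = 'R' || c = 'S'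
def pvOkP (a b : Char) : Bool :=
  (a = 'P' && b = 'Q') || (a = 'Q' && b = 'P') || (a = 'P' && b = 'R') || (a = 'R' && b = 'P') ||
  (a = 'R' && b = 'S') || (a = 'S' && b = 'R') || (a = 'Q' && b = 'S') || (a = 'S' && b = 'Q')
def pvChainOk : List Char → Bool
  | [] => true
  | [_] => true
  | a :: b :: r => pvOkP a b && pvChainOk (b :: r)
def pvValid (s : List Char) : Prop := s.all pvOkC = true ∧ pvChainOk s = true

-- Pre_ excludes exactly the inputs on which A raises KeyError: a character of start outside
-- 'PQRS', or two adjacent characters whose pair has no transition (PS/SP/QR/RQ).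
def Pre_peano_curve (start : String) (iterations : Int) (step : Int) : Prop :=
  pvValid start.toList
instance (start : String) (iterations : Int) (step : Int) : Decidable (Pre_peano_curve start iterations step) := by
  unfold Pre_peano_curve pvValid; infer_instance

def pvWitness_peano_curve : String × Int × Int := ("PQ", 1, 2)

def Spec_peano_curve (start : String) (iterations : Int) (step : Int) (out : List (Int × Int)) : Prop := out = peano_curve_alt start iterations step
instance (start : String) (iterations : Int) (step : Int) (out : List (Int × Int)) : Decidable (Spec_peano_curve start iterations step out) := by unfold Spec_peano_curve; infer_instance

-- ===== CLAIM (what is proved, stated in full; the proofs are below) =====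
def Claim_equal_peano_curve : Prop := ∀ (start : String) (iterations : Int) (step : Int), Dom_peano_curve start iterations step → Pre_peano_curve start iterations step → Spec_peano_curve start iterations step (peano_curve start iterations step)

-- ===== LEMMAS AND PROOFS =====

-- total companions of the lookup tables, used only by the proofs
def pvRuleT (c : Char) : List Char :=
  if c = 'P' then ['P','Q','P','R','S','R','P','Q','P']
  else if c = 'Q' then ['Q','P','Q','S','R','S','Q','P','Q']
  else if c = 'R' then ['R','S','R','P','Q','P','R','S','R']
  else ['S','R','S','Q','P','Q','S','R','S']

def pvVecsT (step : Int) (c : Char) : List (Int × Int) :=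
  if c = 'P' then [(0, step), (0, step), (step, 0), (0, -step), (0, -step), (step, 0), (0, step), (0, step)]
  else if c = 'Q' then [(0, step), (0, step), (-step, 0), (0, -step), (0, -step), (-step, 0), (0, step), (0, step)]
  else if c = 'R' then [(0, -step), (0, -step), (step, 0), (0, step), (0, step), (step, 0), (0, -step), (0, -step)]
  else [(0, -step), (0, -step), (-step, 0), (0, step), (0, step), (-step, 0), (0, -step), (0, -step)]

def pvTransT (step : Int) (a b : Char) : Int × Int :=
  if (a = 'P' ∧ b = 'Q') ∨ (a = 'Q' ∧ b = 'P') then (0, step)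
  else if (a = 'P' ∧ b = 'R') ∨ (a = 'R' ∧ b = 'P') then (step, 0)
  else if (a = 'R' ∧ b = 'S') ∨ (a = 'S' ∧ b = 'R') then (0, -step)
  else (-step, 0)

def pvExpandT (s : List Char) : List Char := (s.map pvRuleT).flatten

def pvGT (step : Int) : Char → List Char → List (Int × Int)
  | _, [] => []
  | p, b :: r => pvTransT step p b :: (pvVecsT step b ++ pvGT step b r)

def pvSpecT (step : Int) : List Char → List (Int × Int)
  | [] => []
  | c :: r => pvVecsT step c ++ pvGT step c r

def pvTail (step : Int) (p? : Option Char) (suf : List Char) : List (Int × Int) :=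
  match p? with
  | none => pvSpecT step suf
  | some p => pvGT step p suf

lemma pvOkC_cases {c : Char} (h : pvOkC c = true) : c = 'P' ∨ c = 'Q' ∨ c = 'R' ∨ c = 'S' := by
  simpa [pvOkC, or_assoc] using h

lemma pvOkP_cases {a b : Char} (h : pvOkP a b = true) :
    (a = 'P' ∧ b = 'Q') ∨ (a = 'Q' ∧ b = 'P') ∨ (a = 'P' ∧ b = 'R') ∨ (a = 'R' ∧ b = 'P') ∨
    (a = 'R' ∧ b = 'S') ∨ (a = 'S' ∧ b = 'R') ∨ (a = 'Q' ∧ b = 'S') ∨ (a = 'S' ∧ b = 'Q') := by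
  simpa [pvOkP, or_assoc] using h

lemma pvDirs_vals {c : Char} (step : Int) (h : pvOkC c = true) :
    (pvDirsA c).bind (fun dirs => dirs.mapM (pvValsA step)) = some (pvVecsT step c) := by
  rcases pvOkC_cases h with rfl | rfl | rfl | rfl <;>
    simp [pvDirsA, pvValsA, pvVecsT, List.mapM_cons, List.mapM_nil]

lemma pvTrans_vals {a b : Char} (step : Int) (h : pvOkP a b = true) :
    ∃ t, pvTransA a b = some t ∧ pvValsA step t = some (pvTransT step a b) := by
  rcases pvOkP_cases h with ⟨rfl, rfl⟩ | ⟨rfl, rfl⟩ | ⟨rfl, rfl⟩ | ⟨rfl, rfl⟩ | ⟨rfl, rfl⟩ | ⟨rfl, rfl⟩ | ⟨rfl, rfl⟩ | ⟨rfl, rfl⟩ <;>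
    exact ⟨_, rfl, by simp [pvValsA, pvTransT]⟩

lemma pvTransB_eq {a b : Char} (step : Int) (h : pvOkP a b = true) :
    pvTransB step a b = some (pvTransT step a b) := by
  rcases pvOkP_cases h with ⟨rfl, rfl⟩ | ⟨rfl, rfl⟩ | ⟨rfl, rfl⟩ | ⟨rfl, rfl⟩ | ⟨rfl, rfl⟩ | ⟨rfl, rfl⟩ | ⟨rfl, rfl⟩ | ⟨rfl, rfl⟩ <;>
    simp [pvTransB, pvTransT]

lemma pvVecsB_eq {c : Char} (step : Int) (h : pvOkC c = true) :
    pvVecsB step c = some (pvVecsT step c) := by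
  rcases pvOkC_cases h with rfl | rfl | rfl | rfl <;> rfl

lemma pvRecA_eq {c : Char} (h : pvOkC c = true) : pvRecA c = some (pvRuleT c) := by
  rcases pvOkC_cases h with rfl | rfl | rfl | rfl <;> rfl

lemma pvRulesB_eq {c : Char} (h : pvOkC c = true) : pvRulesB c = some (pvRuleT c) := by
  rcases pvOkC_cases h with rfl | rfl | rfl | rfl <;> rfl

lemma pvRuleT_props {c : Char} (h : pvOkC c = true) :
    (pvRuleT c).all pvOkC = true ∧ pvChainOk (pvRuleT c) = true ∧
    (pvRuleT c).head? = some c ∧ (pvRuleT c).getLast? = some c := by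
  rcases pvOkC_cases h with rfl | rfl | rfl | rfl <;> decide

lemma pvChainOk_cons {a b : Char} {r : List Char} :
    pvChainOk (a :: b :: r) = (pvOkP a b && pvChainOk (b :: r)) := rfl

lemma pvChainOk_tail {c : Char} {r : List Char} (h : pvChainOk (c :: r) = true) :
    pvChainOk r = true := by
  cases r with
  | nil => rfl
  | cons b r' => rw [pvChainOk_cons, Bool.and_eq_true] at h; exact h.2

lemma pvChainOk_append {l1 l2 : List Char}
    (h1 : pvChainOk l1 = true) (h2 : pvChainOk l2 = true)
    (hj : ∀ x ∈ l1.getLast?, ∀ y ∈ l2.head?, pvOkP x y = true) :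
    pvChainOk (l1 ++ l2) = true := by
  induction l1 with
  | nil => simpa using h2
  | cons a l1' ih =>
    cases l1' with
    | nil =>
      cases l2 with
      | nil => rfl
      | cons y l2' =>
        rw [List.singleton_append, pvChainOk_cons, Bool.and_eq_true]
        exact ⟨hj a (by simp) y (by simp), h2⟩
    | cons b l1'' =>
      rw [pvChainOk_cons, Bool.and_eq_true] at h1
      have := ih h1.2 (by
        intro x hx y hy
        exact hj x (by rw [List.getLast?_cons_cons]; exact hx) y hy)
      rw [List.cons_append, List.cons_append, pvChainOk_cons, Bool.and_eq_true]
      exact ⟨h1.1, by rwa [List.cons_append] at this⟩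

lemma pvExpandT_head {c : Char} {r : List Char} (h : pvOkC c = true) :
    (pvExpandT (c :: r)).head? = some c := by
  have hp := (pvRuleT_props h).2.2.1
  rw [pvExpandT, List.map_cons, List.flatten_cons, List.head?_append_of_ne_nil]
  · exact hp
  · intro hnil; rw [hnil] at hp; simp at hp

lemma pvExpandT_all {s : List Char} (h : s.all pvOkC = true) :
    (pvExpandT s).all pvOkC = true := by
  induction s with
  | nil => rfl
  | cons c r ih =>
    rw [List.all_cons, Bool.and_eq_true] at h
    rw [pvExpandT, List.map_cons, List.flatten_cons, List.all_append, Bool.and_eq_true]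
    exact ⟨(pvRuleT_props h.1).1, ih h.2⟩

lemma pvExpandT_chain {s : List Char} (hall : s.all pvOkC = true)
    (hch : pvChainOk s = true) : pvChainOk (pvExpandT s) = true := by
  induction s with
  | nil => rfl
  | cons c r ih =>
    rw [List.all_cons, Bool.and_eq_true] at hall
    have hrule := pvRuleT_props hall.1
    have hrest : pvChainOk (pvExpandT r) = true := ih hall.2 (pvChainOk_tail hch)
    rw [pvExpandT, List.map_cons, List.flatten_cons]
    refine pvChainOk_append hrule.2.1 hrest ?_
    intro x hx y hy
    rw [hrule.2.2.2, Option.mem_def, Option.some_inj] at hx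
    subst hx
    cases r with
    | nil => simp at hy
    | cons b r' =>
      have hy' : y ∈ (pvExpandT (b :: r')).head? := hy
      rw [show (pvExpandT (b :: r') : List Char).head? = some b from
            pvExpandT_head (by rw [List.all_cons, Bool.and_eq_true] at hall; exact hall.2.1),
          Option.mem_def, Option.some_inj] at hy'
      subst hy'
      rw [pvChainOk_cons, Bool.and_eq_true] at hch
      exact hch.1

lemma pvValid_expand {s : List Char} (h : pvValid s) : pvValid (pvExpandT s) :=
  ⟨pvExpandT_all h.1, pvExpandT_chain h.1 h.2⟩

lemma pvValid_iterate (n : Nat) {s : List Char} (h : pvValid s) :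
    pvValid (pvExpandT^[n] s) := by
  induction n with
  | zero => simpa using h
  | succ n ih => rw [Function.iterate_succ_apply']; exact pvValid_expand ih

lemma pvMapM_recA {s : List Char} (h : s.all pvOkC = true) :
    s.mapM pvRecA = some (s.map pvRuleT) := by
  induction s with
  | nil => rfl
  | cons c r ih =>
    rw [List.all_cons, Bool.and_eq_true] at h
    rw [List.mapM_cons, pvRecA_eq h.1, ih h.2]; rfl

lemma pvMapM_rulesB {s : List Char} (h : s.all pvOkC = true) :
    s.mapM pvRulesB = some (s.map pvRuleT) := by
  induction s with
  | nil => rfl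
  | cons c r ih =>
    rw [List.all_cons, Bool.and_eq_true] at h
    rw [List.mapM_cons, pvRulesB_eq h.1, ih h.2]; rfl

-- the A-side base loop computes pvSpecT
lemma pvBaseA_fold (step : Int) (s : List Char) :
    ∀ (suf : List Char) (k : Int) (p? : Option Char) (out : List (Int × Int)),
      0 ≤ k →
      s.drop k.toNat = suf →
      (k = 0 ↔ p? = none) →
      (∀ p, p? = some p → PySem.List.pyGet? s (k - 1) = some p) →
      suf.all pvOkC = true →
      pvChainOk suf = true →
      (∀ p c r, p? = some p → suf = c :: r → pvOkP p c = true) →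
      (PySem.List.enumerate suf k).foldl
        (fun acc ki =>
          acc.bind (fun out =>
            (if ki.1 ≠ 0 then
                (PySem.List.pyGet? s (ki.1 - 1)).bind (fun before =>
                  (pvTransA before ki.2).bind (fun t =>
                    (pvValsA step t).map (fun tv => out ++ [tv])))
              else some out).bind (fun out2 =>
              ((pvDirsA ki.2).bind (fun dirs => dirs.mapM (pvValsA step))).map
                (fun dv => out2 ++ dv))))
        (some out)
      = some (out ++ pvTail step p? suf) := by
  intro suf
  induction suf with
  | nil =>
    intro k p? out _ _ _ _ _ _ _
    cases p? <;> simp [PySem.List.enumerate_nil, pvTail, pvSpecT, pvGT]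
  | cons c r ih =>
    intro k p? out hk hdrop hzero hp hall hch hj
    rw [List.all_cons, Bool.and_eq_true] at hall
    have hkget : PySem.List.pyGet? s k = some c := by
      have : k = ((k.toNat : Nat) : Int) := by omega
      rw [this, PySem.List.pyGet?_natCast, ← List.head?_drop, hdrop, List.head?_cons]
    have hdrop' : s.drop (k + 1).toNat = r := by
      have h1 : (k + 1).toNat = k.toNat + 1 := by omega
      rw [h1, List.drop_add_one_eq_tail_drop, hdrop, List.tail_cons]
    have step1 :
        (Option.bind (some out) (fun out =>
          (if k ≠ 0 then
              (PySem.List.pyGet? s (k - 1)).bind (fun before =>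
                (pvTransA before c).bind (fun t =>
                  (pvValsA step t).map (fun tv => out ++ [tv])))
            else some out).bind (fun out2 =>
            ((pvDirsA c).bind (fun dirs => dirs.mapM (pvValsA step))).map
              (fun dv => out2 ++ dv))))
        = some ((out ++ (match p? with | none => [] | some p => [pvTransT step p c])) ++ pvVecsT step c) := by
      cases p? with
      | none =>
        have hk0 : k = 0 := hzero.2 rfl
        subst hk0
        simp only [Option.bind_some, ne_eq, not_true_eq_false, reduceIte,
          pvDirs_vals step hall.1]
        simp
      | some p =>
        have hkne : k ≠ 0 := by
          intro h0; exact (Option.some_ne_none p) (by rw [← hzero.1 h0])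
        have hop : pvOkP p c = true := hj p c r rfl rfl
        obtain ⟨t, ht1, ht2⟩ := pvTrans_vals step hop
        simp only [Option.bind_some, if_pos hkne, hp p rfl, ht1, ht2,
          pvDirs_vals step hall.1]
        simp
    rw [PySem.List.enumerate_cons, List.foldl_cons, step1,
        ih (k + 1) (some c) _ (by omega) hdrop'
          (by constructor <;> intro h <;> simp at h <;> omega)
          (by intro p hpc
              rw [Option.some_inj] at hpc; subst hpc
              rw [show k + 1 - 1 = k by ring]; exact hkget)
          hall.2 (pvChainOk_tail hch)
          (by intro p b r' hpc hr
              rw [Option.some_inj] at hpc; subst hpc; subst hr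
              rw [pvChainOk_cons, Bool.and_eq_true] at hch
              exact hch.1)]
    cases p? with
    | none => simp [pvTail, pvSpecT]
    | some p => simp [pvTail, pvGT]

lemma pvBaseA_eq {s : List Char} (step : Int) (h : pvValid s) :
    pvBaseA step s = some (pvSpecT step s) := by
  rw [pvBaseA]
  have := pvBaseA_fold step s s 0 none [] le_rfl (by simp)
    (by simp) (by intro p h; cases h) h.1 h.2 (by intro p c r h; cases h)
  simpa [pvTail] using this

-- the B-side zip loop computes pvGT
lemma pvBaseB_fold (step : Int) :
    ∀ (r : List Char) (a : Char) (out : List (Int × Int)),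
      (a :: r).all pvOkC = true →
      pvChainOk (a :: r) = true →
      ((a :: r).zip r).foldl
        (fun acc ab =>
          acc.bind (fun out =>
            (pvTransB step ab.1 ab.2).bind (fun t =>
              (pvVecsB step ab.2).map (fun vb => out ++ t :: vb))))
        (some out)
      = some (out ++ pvGT step a r) := by
  intro r
  induction r with
  | nil => intro a out _ _; simp [pvGT]
  | cons b r' ih =>
    intro a out hall hch
    rw [List.all_cons, Bool.and_eq_true] at hall
    rw [pvChainOk_cons, Bool.and_eq_true] at hch
    have hb : pvOkC b = true := by
      rw [List.all_cons, Bool.and_eq_true] at hall; exact hall.2.1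
    rw [List.zip_cons_cons, List.foldl_cons]
    simp only [Option.bind_some, pvTransB_eq step hch.1, Option.bind_some,
      pvVecsB_eq step hb, Option.map_some]
    rw [ih b _ hall.2 hch.2]
    simp [pvGT]

lemma pvBaseB_eq {s : List Char} (step : Int) (h : pvValid s) :
    pvBaseB step s = some (pvSpecT step s) := by
  cases s with
  | nil => rfl
  | cons c r =>
    have hc : pvOkC c = true := by
      have := h.1; rw [List.all_cons, Bool.and_eq_true] at this; exact this.1
    rw [pvBaseB, pvVecsB_eq step hc, Option.bind_some,
        pvBaseB_fold step r c _ h.1 h.2]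
    rfl

-- B's expansion loop iterates pvExpandT
lemma pvLoopB (step : Int) : ∀ (n : Nat) (s : List Char), pvValid s →
    (List.range n).foldl
      (fun (acc : Option (List Char)) _ =>
        acc.bind (fun cs => (cs.mapM pvRulesB).map List.flatten))
      (some s)
    = some (pvExpandT^[n] s) := by
  intro n
  induction n with
  | zero => intro s _; rfl
  | succ n ih =>
    intro s hs
    rw [List.range_succ, List.foldl_append, ih s hs, List.foldl_cons, List.foldl_nil,
        Option.bind_some, pvMapM_rulesB (pvValid_iterate n hs).1,
        Function.iterate_succ_apply']
    rfl

-- A's recursion expands n = iterations.toNat times and then builds pvSpecT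
lemma pvMainA (step : Int) : ∀ (n : Nat) (it : Int) (start : String),
    it.toNat = n → pvValid start.toList →
    peano_curve start it step = pvSpecT step (pvExpandT^[n] start.toList) := by
  intro n
  induction n with
  | zero =>
    intro it start hn hv
    have hle : it ≤ 0 := by omega
    rw [peano_curve, if_pos hle, pvBaseA_eq step hv]
    rfl
  | succ n ih =>
    intro it start hn hv
    have hgt : ¬ it ≤ 0 := by omega
    rw [peano_curve, if_neg hgt, pvMapM_recA hv.1]
    show peano_curve (String.ofList (start.toList.map pvRuleT).flatten) (it - 1) step
        = pvSpecT step (pvExpandT^[n + 1] start.toList)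
    have hlist : (String.ofList (start.toList.map pvRuleT).flatten).toList
        = pvExpandT start.toList := by
      rw [String.toList_ofList]; rfl
    rw [ih (it - 1) _ (by omega) (by rw [hlist]; exact pvValid_expand hv), hlist,
        ← Function.iterate_succ_apply]

-- ===== VERDICT (by name: the statement is the Claim_ definition above) =====
theorem peano_curve_spec : Claim_equal_peano_curve := by
  intro start iterations step _ hpre
  unfold Spec_peano_curve
  have hv : pvValid start.toList := hpre
  rw [pvMainA step iterations.toNat iterations start rfl hv]
  unfold peano_curve_alt
  have hm : (max iterations 0).toNat = iterations.toNat := by omega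
  rw [hm, pvLoopB step iterations.toNat start.toList hv]
  show pvSpecT step (pvExpandT^[iterations.toNat] start.toList)
      = (pvBaseB step (pvExpandT^[iterations.toNat] start.toList)).getD []
  rw [pvBaseB_eq step (pvValid_iterate iterations.toNat hv)]
  rfl
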